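-- pv_equiv track=rewrite | github.com/Prissme/PTV | cogs/plaza.py | _pick_preferred_listing_index
-- ===== SOURCE A (Python) =====
-- from typing import Dict, Iterable, Mapping, Optional, Sequence, cast
--
-- def _pick_preferred_listing_index(rows: Sequence[Mapping[str, object]]) -> int:
--     normal_candidates: list[int] = []
--     fallback_inactive: list[int] = []
--     for index, record in enumerate(rows):
--         is_active = bool(record.get("is_active"))
--         is_gold = bool(record.get("is_gold"))
--         is_rainbow = bool(record.get("is_rainbow"))
--         if not is_gold and not is_rainbow:
--             if not is_active:
--                 return index
--             normal_candidates.append(index)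
--         if not is_active:
--             fallback_inactive.append(index)
--     if fallback_inactive:
--         return fallback_inactive[0]
--     if normal_candidates:
--         return normal_candidates[0]
--     return 0
-- ===== SOURCE B (Python) =====
-- from typing import Mapping, Sequence
--
-- def _pick_preferred_listing_index(rows: Sequence[Mapping[str, object]]) -> int:
--     def flags(record):
--         return (bool(record.get("is_active")),
--                 bool(record.get("is_gold")),
--                 bool(record.get("is_rainbow")))
--
--     first_plain_inactive = next(
--         (i for i, r in enumerate(rows)
--          if not any(flags(r))), None)
--     if first_plain_inactive is not None:
--         return first_plain_inactive
--     first_inactive = next(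
--         (i for i, r in enumerate(rows) if not flags(r)[0]), None)
--     if first_inactive is not None:
--         return first_inactive
--     first_normal = next(
--         (i for i, r in enumerate(rows)
--          if not flags(r)[1] and not flags(r)[2]), None)
--     if first_normal is not None:
--         return first_normal
--     return 0
-- ===== Notes on version B (the rewrite author's own statement) =====
-- stated objective: simpler
-- what changed: Replaces A's single accumulating loop with its early return and two candidate lists by three independent priority scans (first plain-inactive, else first inactive, else first non-gold/non-rainbow, else 0).
import Mathlib
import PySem

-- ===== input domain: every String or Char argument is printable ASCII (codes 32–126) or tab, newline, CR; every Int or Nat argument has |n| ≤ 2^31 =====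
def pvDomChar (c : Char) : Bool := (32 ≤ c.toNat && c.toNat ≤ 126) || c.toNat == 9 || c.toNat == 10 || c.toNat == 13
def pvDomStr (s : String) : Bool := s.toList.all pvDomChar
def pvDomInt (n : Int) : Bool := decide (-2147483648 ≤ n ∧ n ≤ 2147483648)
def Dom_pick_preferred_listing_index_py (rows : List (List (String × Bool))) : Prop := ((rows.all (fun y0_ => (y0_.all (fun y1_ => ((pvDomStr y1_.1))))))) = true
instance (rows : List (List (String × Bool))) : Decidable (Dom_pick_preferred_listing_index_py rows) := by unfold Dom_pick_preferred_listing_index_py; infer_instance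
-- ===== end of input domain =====

-- ===== PORT A =====
-- dict .get(k) on an association list: first match, default none → bool() of a missing key is False
def pvGetFlag (record : List (String × Bool)) (k : String) : Bool :=
  ((record.find? (fun p => p.1 == k)).map (·.2)).getD false

-- the for-loop of A: early return on a plain inactive row, otherwise accumulate the two lists
def pvLoopA (rows : List (List (String × Bool))) (index : Int)
    (normal_candidates fallback_inactive : List Int) : Int :=
  match rows with
  | [] =>
    match fallback_inactive with
    | j :: _ => j
    | [] =>
      match normal_candidates with
      | j :: _ => j
      | [] => 0
  | record :: rest =>
    let is_active := pvGetFlag record "is_active"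
    let is_gold := pvGetFlag record "is_gold"
    let is_rainbow := pvGetFlag record "is_rainbow"
    if !is_gold && !is_rainbow && !is_active then index
    else
      let normal_candidates :=
        if !is_gold && !is_rainbow then normal_candidates ++ [index] else normal_candidates
      let fallback_inactive :=
        if !is_active then fallback_inactive ++ [index] else fallback_inactive
      pvLoopA rest (index + 1) normal_candidates fallback_inactive

def pick_preferred_listing_index_py (rows : List (List (String × Bool))) : Int :=
  pvLoopA rows 0 [] []

-- ===== PORT B =====
-- one generator scan: first index (from i) whose record satisfies p, as next(…, None)
def pvFirstIdx (p : List (String × Bool) → Bool) (rows : List (List (String × Bool)))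
    (i : Int) : Option Int :=
  match rows with
  | [] => none
  | r :: rest => if p r then some i else pvFirstIdx p rest (i + 1)

def pvFlags (record : List (String × Bool)) : Bool × Bool × Bool :=
  (pvGetFlag record "is_active", pvGetFlag record "is_gold", pvGetFlag record "is_rainbow")

def pick_preferred_listing_index_py_alt (rows : List (List (String × Bool))) : Int :=
  match pvFirstIdx (fun r => !(pvFlags r).1 && !(pvFlags r).2.1 && !(pvFlags r).2.2) rows 0 with
  | some i => i
  | none =>
    match pvFirstIdx (fun r => !(pvFlags r).1) rows 0 with
    | some i => i
    | none =>
      match pvFirstIdx (fun r => !(pvFlags r).2.1 && !(pvFlags r).2.2) rows 0 with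
      | some i => i
      | none => 0

-- ===== PRECONDITION & SPEC =====
def Spec_pick_preferred_listing_index_py (rows : List (List (String × Bool))) (out : Int) : Prop := out = pick_preferred_listing_index_py_alt rows
instance (rows : List (List (String × Bool))) (out : Int) : Decidable (Spec_pick_preferred_listing_index_py rows out) := by unfold Spec_pick_preferred_listing_index_py; infer_instance

-- ===== CLAIM (what is proved, stated in full; the proofs are below) =====
def Claim_equal_pick_preferred_listing_index_py : Prop := ∀ (rows : List (List (String × Bool))), Dom_pick_preferred_listing_index_py rows → Spec_pick_preferred_listing_index_py rows (pick_preferred_listing_index_py rows)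

-- ===== LEMMAS AND PROOFS =====

-- A's loop result written as a chain of B's three scans with the pending accumulators in front
theorem pvLoopA_eq (rows : List (List (String × Bool))) :
    ∀ (i : Int) (nc fi : List Int),
    pvLoopA rows i nc fi =
      ((pvFirstIdx (fun r => !(pvFlags r).1 && !(pvFlags r).2.1 && !(pvFlags r).2.2) rows i).or
        ((fi.head?.or (pvFirstIdx (fun r => !(pvFlags r).1) rows i)).or
          (nc.head?.or (pvFirstIdx (fun r => !(pvFlags r).2.1 && !(pvFlags r).2.2) rows i)))).getD 0 := by
  induction rows with
  | nil =>
    intro i nc fi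
    cases fi <;> cases nc <;> simp [pvLoopA, pvFirstIdx]
  | cons r rest ih =>
    intro i nc fi
    simp only [pvLoopA, pvFirstIdx, pvFlags]
    by_cases hg : pvGetFlag r "is_gold" <;>
      by_cases hrb : pvGetFlag r "is_rainbow" <;>
        by_cases ha : pvGetFlag r "is_active" <;>
          simp [pvFlags, hg, hrb, ha, ih, Option.or_assoc]

-- ===== VERDICT (by name: the statement is the Claim_ definition above) =====
theorem pick_preferred_listing_index_py_spec : Claim_equal_pick_preferred_listing_index_py := by
  intro rows _
  show pick_preferred_listing_index_py rows = pick_preferred_listing_index_py_alt rows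
  simp only [pick_preferred_listing_index_py, pick_preferred_listing_index_py_alt, pvLoopA_eq]
  cases h1 : pvFirstIdx (fun r => !(pvFlags r).1 && !(pvFlags r).2.1 && !(pvFlags r).2.2) rows 0 <;>
    cases h2 : pvFirstIdx (fun r => !(pvFlags r).1) rows 0 <;>
      cases h3 : pvFirstIdx (fun r => !(pvFlags r).2.1 && !(pvFlags r).2.2) rows 0 <;>
        simp [Option.or]

-- B keeps the same result by a different decomposition: three independent priority scans instead of one accumulating early-return loop (objective: simpler).
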